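-- pv_equiv track=rewrite | github.com/alkemyTech/OT281-python | bigdata/src/D_cant_respuestas_vs_puntajes.py | segment_answer_count
-- ===== SOURCE A (Python) =====
-- INTERVAL_BOUNDARIES = [0, 1, 2, 5, 10, 25, 50, 100, 200, 500, 1000]
--
-- def segment_answer_count(data):
--     """
--     This method segment AnswerCount into intervals.
--     The intervals boundaries are given by INTERVAL_BOUNDARIES constant.
--
--     Args:
--         data (dict): A dictionary with AnswerCount as keys and Score as values.
--
--     Returns:
--         dict: Dictionary with answer count intervals as keys and Score as values.
--     """
--     #Get the boundaries list
--     boundaries_list = INTERVAL_BOUNDARIES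
--     #Get answer count and score from data
--     answer_count = list(data.keys())[0]
--     score = list(data.values())[0]
--     #Iterate through boundaries
--     for idx, boundary in enumerate(boundaries_list):
--         #If is not the penultimate boundary
--         if idx < len(boundaries_list) - 1:
--             #Get next boundary
--             next_boundary = boundaries_list[idx+1]
--             #If answer count is between this boundary and the next
--             if answer_count >= boundary and answer_count < next_boundary:
--                 #Add item to data with interval as key instead of answer count
--                 interval = f'{boundary}-{next_boundary}'
--                 data.update({interval : score})
--                 #Delete old answer count item
--                 del(data[answer_count])
--                 #Return updated data dict
--                 return data
--         #If is the penultimate boundary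
--         else:
--             #And answer_count is higher than it
--             if answer_count >= boundary:
--                 #Add item to data with interval as key instead of answer count
--                 interval = f'{boundary}+'
--                 data.update({interval : score})
--                 #Delete old answer count item
--                 del(data[answer_count])
--                 #Return updated data dict
--                 return data
--     #In case of data not fitting in any interval, return None
--     return
-- ===== SOURCE B (Python) =====
-- INTERVAL_BOUNDARIES = [0, 1, 2, 5, 10, 25, 50, 100, 200, 500, 1000]
-- # bucket labels precomputed once from the boundaries
-- INTERVAL_LABELS = [
--     f'{INTERVAL_BOUNDARIES[i]}-{INTERVAL_BOUNDARIES[i + 1]}'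
--     for i in range(len(INTERVAL_BOUNDARIES) - 1)
-- ] + [f'{INTERVAL_BOUNDARIES[-1]}+']
--
--
-- def segment_answer_count(data):
--     answer_count = next(iter(data))
--     score = data[answer_count]
--     # binary search: lo ends as the number of boundaries <= answer_count
--     lo, hi = 0, len(INTERVAL_BOUNDARIES)
--     while lo < hi:
--         mid = (lo + hi) // 2
--         if INTERVAL_BOUNDARIES[mid] <= answer_count:
--             lo = mid + 1
--         else:
--             hi = mid
--     if lo == 0:
--         return None
--     del data[answer_count]
--     data[INTERVAL_LABELS[lo - 1]] = score
--     return data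
-- ===== Notes on version B (the rewrite author's own statement) =====
-- stated objective: alternative
-- what changed: A scans the boundary list forward with an enumerate loop testing membership in each half-open pair [b, next) with a special last-boundary branch and builds the interval string on the fly; B precomputes the label table once and locates the bucket with a hand-written binary search (while lo < hi) counting the boundaries <= answer_count, then indexes the table. Pre_ excludes the empty dict (both raise) and multi-entry dicts with first key >= 0, where the returned dict mixes int and str keys and so leaves the declared str-keyed return type (A and B still agree there).
-- outside the precondition, e.g. on segment_answer_count({}): A raises IndexError, B raises StopIteration; on segment_answer_count({1: 2, 3: 4}): A returns {3: 4, '1-2': 2}, B returns {3: 4, '1-2': 2}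
import Mathlib
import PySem

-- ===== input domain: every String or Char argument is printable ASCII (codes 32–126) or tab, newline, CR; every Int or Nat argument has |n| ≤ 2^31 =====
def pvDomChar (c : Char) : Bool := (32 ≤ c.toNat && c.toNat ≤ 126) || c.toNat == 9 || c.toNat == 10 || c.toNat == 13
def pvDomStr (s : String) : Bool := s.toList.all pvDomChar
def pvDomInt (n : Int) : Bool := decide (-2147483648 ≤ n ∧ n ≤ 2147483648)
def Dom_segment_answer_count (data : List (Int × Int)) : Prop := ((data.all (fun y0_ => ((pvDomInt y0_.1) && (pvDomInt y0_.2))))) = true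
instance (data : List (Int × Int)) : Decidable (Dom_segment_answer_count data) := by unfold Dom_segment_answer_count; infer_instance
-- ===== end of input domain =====

-- B replaces A's forward scan over [boundary, next_boundary) pairs by a hand-written binary search over
-- the boundaries plus a precomputed label table; same return value and the same in-place mutation
-- (delete int key, append interval key); the equivalence proved here is about the return value.

-- ===== PORT A =====
def SAC_boundaries : List Int := [0, 1, 2, 5, 10, 25, 50, 100, 200, 500, 1000]

-- the returned dict: the entries other than answer_count (their int keys rendered with str;
-- exact on Pre_, where no such entry remains) followed by the freshly appended interval key
def SAC_out (rest : List (Int × Int)) (interval : String) (score : Int) : List (String × Int) :=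
  rest.map (fun p => (PySem.Int.toStr p.1, p.2)) ++ [(interval, score)]

def SAC_loopA (data : List (Int × Int)) (answer_count score : Int) :
    List (Int × Int) → Option (List (String × Int))
  | [] => none
  | (idx, boundary) :: rest =>
    if idx < (SAC_boundaries.length : Int) - 1 then
      match PySem.List.pyGet? SAC_boundaries (idx + 1) with
      | none => none  -- unreachable: idx+1 is in range
      | some next_boundary =>
        if answer_count ≥ boundary ∧ answer_count < next_boundary then
          some (SAC_out ((PySem.Dict.erase (PySem.Dict.mk data) answer_count).items)
            (PySem.Int.toStr boundary ++ "-" ++ PySem.Int.toStr next_boundary) score)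
        else SAC_loopA data answer_count score rest
    else
      if answer_count ≥ boundary then
        some (SAC_out ((PySem.Dict.erase (PySem.Dict.mk data) answer_count).items)
          (PySem.Int.toStr boundary ++ "+") score)
      else SAC_loopA data answer_count score rest

def segment_answer_count (data : List (Int × Int)) : Option (List (String × Int)) :=
  match data with
  | [] => none  -- list(data.keys())[0] raises IndexError: outside Pre_
  | (answer_count, score) :: _ =>
      SAC_loopA data answer_count score (PySem.List.enumerate SAC_boundaries)

-- ===== PORT B =====
-- the precomputed bucket labels INTERVAL_LABELS of Source B
def SAC_labels : List String :=
  (PySem.List.pyRange 0 ((SAC_boundaries.length : Int) - 1) 1).map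
    (fun i => PySem.Int.toStr ((PySem.List.pyGet? SAC_boundaries i).getD 0) ++ "-" ++
              PySem.Int.toStr ((PySem.List.pyGet? SAC_boundaries (i + 1)).getD 0))
  ++ [PySem.Int.toStr ((PySem.List.pyGet? SAC_boundaries (-1)).getD 0) ++ "+"]

-- the while loop of Source B: .getD 0 stands for the indexing INTERVAL_BOUNDARIES[mid], in range whenever 0 ≤ lo < hi ≤ 11
def SAC_bsearch (k lo hi : Int) : Int :=
  if h : lo < hi then
    let mid := PySem.Int.floordiv (lo + hi) 2
    if (PySem.List.pyGet? SAC_boundaries mid).getD 0 ≤ k then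
      SAC_bsearch k (mid + 1) hi
    else
      SAC_bsearch k lo mid
  else lo
termination_by (hi - lo).toNat
decreasing_by
  · have h1 : lo ≤ PySem.Int.floordiv (lo + hi) 2 := by
      rw [PySem.Int.le_floordiv_iff_mul_le (by norm_num)]; omega
    omega
  · have h2 : PySem.Int.floordiv (lo + hi) 2 < hi := by
      rw [PySem.Int.floordiv_lt_iff_lt_mul (by norm_num)]; omega
    have h1 : lo ≤ PySem.Int.floordiv (lo + hi) 2 := by
      rw [PySem.Int.le_floordiv_iff_mul_le (by norm_num)]; omega
    omega

def segment_answer_count_alt (data : List (Int × Int)) : Option (List (String × Int)) :=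
  match data with
  | [] => none  -- next(iter(data)) raises StopIteration: outside Pre_
  | (answer_count, _) :: _ =>
    match PySem.Dict.get? (PySem.Dict.mk data) answer_count with
    | none => none  -- unreachable: answer_count is a key of data
    | some score =>
      let lo := SAC_bsearch answer_count 0 (SAC_boundaries.length : Int)
      if lo = 0 then none
      else some (SAC_out ((PySem.Dict.erase (PySem.Dict.mk data) answer_count).items)
        ((PySem.List.pyGet? SAC_labels (lo - 1)).getD "") score)  -- index lo-1 always in range

-- ===== PRECONDITION & SPEC =====
-- Pre_ excludes the empty dict, on which both Pythons raise (IndexError / StopIteration), and dicts with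
-- more than one entry whose first key is >= 0: there A (and B) return a dict mixing int and str keys,
-- which is not a value of the declared String-keyed return type (A and B still return the same dict there).
def Pre_segment_answer_count (data : List (Int × Int)) : Prop :=
  data ≠ [] ∧ (data.length = 1 ∨ (data.headD (0, 0)).1 < 0)
instance (data : List (Int × Int)) : Decidable (Pre_segment_answer_count data) := by
  unfold Pre_segment_answer_count; infer_instance
def pvWitness_segment_answer_count : (List (Int × Int)) := [(3, 7)]

def Spec_segment_answer_count (data : List (Int × Int)) (out : Option (List (String × Int))) : Prop :=
  out = segment_answer_count_alt data
instance (data : List (Int × Int)) (out : Option (List (String × Int))) :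
    Decidable (Spec_segment_answer_count data out) := by
  unfold Spec_segment_answer_count; infer_instance

-- ===== CLAIM (what is proved, stated in full; the proofs are below) =====
def Claim_equal_segment_answer_count : Prop :=
  ∀ (data : List (Int × Int)), Dom_segment_answer_count data →
    Pre_segment_answer_count data →
      Spec_segment_answer_count data (segment_answer_count data)

-- ===== LEMMAS AND PROOFS =====

theorem SAC_skip_pair (data : List (Int × Int)) (k v idx b nb : Int) (rest : List (Int × Int))
    (h1 : idx < (SAC_boundaries.length : Int) - 1)
    (h2 : PySem.List.pyGet? SAC_boundaries (idx + 1) = some nb)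
    (h3 : ¬(k ≥ b ∧ k < nb)) :
    SAC_loopA data k v ((idx, b) :: rest) = SAC_loopA data k v rest := by
  rw [SAC_loopA, if_pos h1, h2]; exact if_neg h3

theorem SAC_hit_pair (data : List (Int × Int)) (k v idx b nb : Int) (rest : List (Int × Int))
    (h1 : idx < (SAC_boundaries.length : Int) - 1)
    (h2 : PySem.List.pyGet? SAC_boundaries (idx + 1) = some nb)
    (h3 : k ≥ b ∧ k < nb) :
    SAC_loopA data k v ((idx, b) :: rest)
      = some (SAC_out ((PySem.Dict.erase (PySem.Dict.mk data) k).items)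
          (PySem.Int.toStr b ++ "-" ++ PySem.Int.toStr nb) v) := by
  rw [SAC_loopA, if_pos h1, h2]; exact if_pos h3

theorem SAC_hit_last (data : List (Int × Int)) (k v idx b : Int) (rest : List (Int × Int))
    (h1 : ¬ idx < (SAC_boundaries.length : Int) - 1)
    (h3 : k ≥ b) :
    SAC_loopA data k v ((idx, b) :: rest)
      = some (SAC_out ((PySem.Dict.erase (PySem.Dict.mk data) k).items)
          (PySem.Int.toStr b ++ "+") v) := by
  rw [SAC_loopA, if_neg h1, if_pos h3]

theorem SAC_skip_last (data : List (Int × Int)) (k v idx b : Int) (rest : List (Int × Int))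
    (h1 : ¬ idx < (SAC_boundaries.length : Int) - 1)
    (h3 : ¬ k ≥ b) :
    SAC_loopA data k v ((idx, b) :: rest) = SAC_loopA data k v rest := by
  rw [SAC_loopA, if_neg h1, if_neg h3]

theorem SAC_bs0 (k : Int) (hb : k < 0) : SAC_bsearch k 0 11 = 0 := by
  rw [SAC_bsearch, dif_pos (show (0:Int) < 11 by norm_num)]
  simp only [show PySem.Int.floordiv ((0:Int) + 11) 2 = 5 from by decide,
    show (PySem.List.pyGet? SAC_boundaries 5).getD 0 = (25:Int) from by decide]
  rw [if_neg (show ¬((25:Int) ≤ k) by omega)]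
  rw [SAC_bsearch, dif_pos (show (0:Int) < 5 by norm_num)]
  simp only [show PySem.Int.floordiv ((0:Int) + 5) 2 = 2 from by decide,
    show (PySem.List.pyGet? SAC_boundaries 2).getD 0 = (2:Int) from by decide]
  rw [if_neg (show ¬((2:Int) ≤ k) by omega)]
  rw [SAC_bsearch, dif_pos (show (0:Int) < 2 by norm_num)]
  simp only [show PySem.Int.floordiv ((0:Int) + 2) 2 = 1 from by decide,
    show (PySem.List.pyGet? SAC_boundaries 1).getD 0 = (1:Int) from by decide]
  rw [if_neg (show ¬((1:Int) ≤ k) by omega)]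
  rw [SAC_bsearch, dif_pos (show (0:Int) < 1 by norm_num)]
  simp only [show PySem.Int.floordiv ((0:Int) + 1) 2 = 0 from by decide,
    show (PySem.List.pyGet? SAC_boundaries 0).getD 0 = (0:Int) from by decide]
  rw [if_neg (show ¬((0:Int) ≤ k) by omega)]
  rw [SAC_bsearch, dif_neg (show ¬((0:Int) < 0) by norm_num)]

theorem SAC_bs1 (k : Int) (ha : 0 ≤ k) (hb : k < 1) : SAC_bsearch k 0 11 = 1 := by
  rw [SAC_bsearch, dif_pos (show (0:Int) < 11 by norm_num)]
  simp only [show PySem.Int.floordiv ((0:Int) + 11) 2 = 5 from by decide,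
    show (PySem.List.pyGet? SAC_boundaries 5).getD 0 = (25:Int) from by decide]
  rw [if_neg (show ¬((25:Int) ≤ k) by omega)]
  rw [SAC_bsearch, dif_pos (show (0:Int) < 5 by norm_num)]
  simp only [show PySem.Int.floordiv ((0:Int) + 5) 2 = 2 from by decide,
    show (PySem.List.pyGet? SAC_boundaries 2).getD 0 = (2:Int) from by decide]
  rw [if_neg (show ¬((2:Int) ≤ k) by omega)]
  rw [SAC_bsearch, dif_pos (show (0:Int) < 2 by norm_num)]
  simp only [show PySem.Int.floordiv ((0:Int) + 2) 2 = 1 from by decide,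
    show (PySem.List.pyGet? SAC_boundaries 1).getD 0 = (1:Int) from by decide]
  rw [if_neg (show ¬((1:Int) ≤ k) by omega)]
  rw [SAC_bsearch, dif_pos (show (0:Int) < 1 by norm_num)]
  simp only [show PySem.Int.floordiv ((0:Int) + 1) 2 = 0 from by decide,
    show (PySem.List.pyGet? SAC_boundaries 0).getD 0 = (0:Int) from by decide]
  rw [if_pos (show (0:Int) ≤ k by omega)]
  simp only [Int.reduceAdd]
  rw [SAC_bsearch, dif_neg (show ¬((1:Int) < 1) by norm_num)]

theorem SAC_bs2 (k : Int) (ha : 1 ≤ k) (hb : k < 2) : SAC_bsearch k 0 11 = 2 := by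
  rw [SAC_bsearch, dif_pos (show (0:Int) < 11 by norm_num)]
  simp only [show PySem.Int.floordiv ((0:Int) + 11) 2 = 5 from by decide,
    show (PySem.List.pyGet? SAC_boundaries 5).getD 0 = (25:Int) from by decide]
  rw [if_neg (show ¬((25:Int) ≤ k) by omega)]
  rw [SAC_bsearch, dif_pos (show (0:Int) < 5 by norm_num)]
  simp only [show PySem.Int.floordiv ((0:Int) + 5) 2 = 2 from by decide,
    show (PySem.List.pyGet? SAC_boundaries 2).getD 0 = (2:Int) from by decide]
  rw [if_neg (show ¬((2:Int) ≤ k) by omega)]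
  rw [SAC_bsearch, dif_pos (show (0:Int) < 2 by norm_num)]
  simp only [show PySem.Int.floordiv ((0:Int) + 2) 2 = 1 from by decide,
    show (PySem.List.pyGet? SAC_boundaries 1).getD 0 = (1:Int) from by decide]
  rw [if_pos (show (1:Int) ≤ k by omega)]
  simp only [Int.reduceAdd]
  rw [SAC_bsearch, dif_neg (show ¬((2:Int) < 2) by norm_num)]

theorem SAC_bs3 (k : Int) (ha : 2 ≤ k) (hb : k < 5) : SAC_bsearch k 0 11 = 3 := by
  rw [SAC_bsearch, dif_pos (show (0:Int) < 11 by norm_num)]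
  simp only [show PySem.Int.floordiv ((0:Int) + 11) 2 = 5 from by decide,
    show (PySem.List.pyGet? SAC_boundaries 5).getD 0 = (25:Int) from by decide]
  rw [if_neg (show ¬((25:Int) ≤ k) by omega)]
  rw [SAC_bsearch, dif_pos (show (0:Int) < 5 by norm_num)]
  simp only [show PySem.Int.floordiv ((0:Int) + 5) 2 = 2 from by decide,
    show (PySem.List.pyGet? SAC_boundaries 2).getD 0 = (2:Int) from by decide]
  rw [if_pos (show (2:Int) ≤ k by omega)]
  simp only [Int.reduceAdd]
  rw [SAC_bsearch, dif_pos (show (3:Int) < 5 by norm_num)]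
  simp only [show PySem.Int.floordiv ((3:Int) + 5) 2 = 4 from by decide,
    show (PySem.List.pyGet? SAC_boundaries 4).getD 0 = (10:Int) from by decide]
  rw [if_neg (show ¬((10:Int) ≤ k) by omega)]
  rw [SAC_bsearch, dif_pos (show (3:Int) < 4 by norm_num)]
  simp only [show PySem.Int.floordiv ((3:Int) + 4) 2 = 3 from by decide,
    show (PySem.List.pyGet? SAC_boundaries 3).getD 0 = (5:Int) from by decide]
  rw [if_neg (show ¬((5:Int) ≤ k) by omega)]
  rw [SAC_bsearch, dif_neg (show ¬((3:Int) < 3) by norm_num)]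

theorem SAC_bs4 (k : Int) (ha : 5 ≤ k) (hb : k < 10) : SAC_bsearch k 0 11 = 4 := by
  rw [SAC_bsearch, dif_pos (show (0:Int) < 11 by norm_num)]
  simp only [show PySem.Int.floordiv ((0:Int) + 11) 2 = 5 from by decide,
    show (PySem.List.pyGet? SAC_boundaries 5).getD 0 = (25:Int) from by decide]
  rw [if_neg (show ¬((25:Int) ≤ k) by omega)]
  rw [SAC_bsearch, dif_pos (show (0:Int) < 5 by norm_num)]
  simp only [show PySem.Int.floordiv ((0:Int) + 5) 2 = 2 from by decide,
    show (PySem.List.pyGet? SAC_boundaries 2).getD 0 = (2:Int) from by decide]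
  rw [if_pos (show (2:Int) ≤ k by omega)]
  simp only [Int.reduceAdd]
  rw [SAC_bsearch, dif_pos (show (3:Int) < 5 by norm_num)]
  simp only [show PySem.Int.floordiv ((3:Int) + 5) 2 = 4 from by decide,
    show (PySem.List.pyGet? SAC_boundaries 4).getD 0 = (10:Int) from by decide]
  rw [if_neg (show ¬((10:Int) ≤ k) by omega)]
  rw [SAC_bsearch, dif_pos (show (3:Int) < 4 by norm_num)]
  simp only [show PySem.Int.floordiv ((3:Int) + 4) 2 = 3 from by decide,
    show (PySem.List.pyGet? SAC_boundaries 3).getD 0 = (5:Int) from by decide]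
  rw [if_pos (show (5:Int) ≤ k by omega)]
  simp only [Int.reduceAdd]
  rw [SAC_bsearch, dif_neg (show ¬((4:Int) < 4) by norm_num)]

theorem SAC_bs5 (k : Int) (ha : 10 ≤ k) (hb : k < 25) : SAC_bsearch k 0 11 = 5 := by
  rw [SAC_bsearch, dif_pos (show (0:Int) < 11 by norm_num)]
  simp only [show PySem.Int.floordiv ((0:Int) + 11) 2 = 5 from by decide,
    show (PySem.List.pyGet? SAC_boundaries 5).getD 0 = (25:Int) from by decide]
  rw [if_neg (show ¬((25:Int) ≤ k) by omega)]
  rw [SAC_bsearch, dif_pos (show (0:Int) < 5 by norm_num)]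
  simp only [show PySem.Int.floordiv ((0:Int) + 5) 2 = 2 from by decide,
    show (PySem.List.pyGet? SAC_boundaries 2).getD 0 = (2:Int) from by decide]
  rw [if_pos (show (2:Int) ≤ k by omega)]
  simp only [Int.reduceAdd]
  rw [SAC_bsearch, dif_pos (show (3:Int) < 5 by norm_num)]
  simp only [show PySem.Int.floordiv ((3:Int) + 5) 2 = 4 from by decide,
    show (PySem.List.pyGet? SAC_boundaries 4).getD 0 = (10:Int) from by decide]
  rw [if_pos (show (10:Int) ≤ k by omega)]
  simp only [Int.reduceAdd]
  rw [SAC_bsearch, dif_neg (show ¬((5:Int) < 5) by norm_num)]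

theorem SAC_bs6 (k : Int) (ha : 25 ≤ k) (hb : k < 50) : SAC_bsearch k 0 11 = 6 := by
  rw [SAC_bsearch, dif_pos (show (0:Int) < 11 by norm_num)]
  simp only [show PySem.Int.floordiv ((0:Int) + 11) 2 = 5 from by decide,
    show (PySem.List.pyGet? SAC_boundaries 5).getD 0 = (25:Int) from by decide]
  rw [if_pos (show (25:Int) ≤ k by omega)]
  simp only [Int.reduceAdd]
  rw [SAC_bsearch, dif_pos (show (6:Int) < 11 by norm_num)]
  simp only [show PySem.Int.floordiv ((6:Int) + 11) 2 = 8 from by decide,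
    show (PySem.List.pyGet? SAC_boundaries 8).getD 0 = (200:Int) from by decide]
  rw [if_neg (show ¬((200:Int) ≤ k) by omega)]
  rw [SAC_bsearch, dif_pos (show (6:Int) < 8 by norm_num)]
  simp only [show PySem.Int.floordiv ((6:Int) + 8) 2 = 7 from by decide,
    show (PySem.List.pyGet? SAC_boundaries 7).getD 0 = (100:Int) from by decide]
  rw [if_neg (show ¬((100:Int) ≤ k) by omega)]
  rw [SAC_bsearch, dif_pos (show (6:Int) < 7 by norm_num)]
  simp only [show PySem.Int.floordiv ((6:Int) + 7) 2 = 6 from by decide,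
    show (PySem.List.pyGet? SAC_boundaries 6).getD 0 = (50:Int) from by decide]
  rw [if_neg (show ¬((50:Int) ≤ k) by omega)]
  rw [SAC_bsearch, dif_neg (show ¬((6:Int) < 6) by norm_num)]

theorem SAC_bs7 (k : Int) (ha : 50 ≤ k) (hb : k < 100) : SAC_bsearch k 0 11 = 7 := by
  rw [SAC_bsearch, dif_pos (show (0:Int) < 11 by norm_num)]
  simp only [show PySem.Int.floordiv ((0:Int) + 11) 2 = 5 from by decide,
    show (PySem.List.pyGet? SAC_boundaries 5).getD 0 = (25:Int) from by decide]
  rw [if_pos (show (25:Int) ≤ k by omega)]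
  simp only [Int.reduceAdd]
  rw [SAC_bsearch, dif_pos (show (6:Int) < 11 by norm_num)]
  simp only [show PySem.Int.floordiv ((6:Int) + 11) 2 = 8 from by decide,
    show (PySem.List.pyGet? SAC_boundaries 8).getD 0 = (200:Int) from by decide]
  rw [if_neg (show ¬((200:Int) ≤ k) by omega)]
  rw [SAC_bsearch, dif_pos (show (6:Int) < 8 by norm_num)]
  simp only [show PySem.Int.floordiv ((6:Int) + 8) 2 = 7 from by decide,
    show (PySem.List.pyGet? SAC_boundaries 7).getD 0 = (100:Int) from by decide]
  rw [if_neg (show ¬((100:Int) ≤ k) by omega)]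
  rw [SAC_bsearch, dif_pos (show (6:Int) < 7 by norm_num)]
  simp only [show PySem.Int.floordiv ((6:Int) + 7) 2 = 6 from by decide,
    show (PySem.List.pyGet? SAC_boundaries 6).getD 0 = (50:Int) from by decide]
  rw [if_pos (show (50:Int) ≤ k by omega)]
  simp only [Int.reduceAdd]
  rw [SAC_bsearch, dif_neg (show ¬((7:Int) < 7) by norm_num)]

theorem SAC_bs8 (k : Int) (ha : 100 ≤ k) (hb : k < 200) : SAC_bsearch k 0 11 = 8 := by
  rw [SAC_bsearch, dif_pos (show (0:Int) < 11 by norm_num)]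
  simp only [show PySem.Int.floordiv ((0:Int) + 11) 2 = 5 from by decide,
    show (PySem.List.pyGet? SAC_boundaries 5).getD 0 = (25:Int) from by decide]
  rw [if_pos (show (25:Int) ≤ k by omega)]
  simp only [Int.reduceAdd]
  rw [SAC_bsearch, dif_pos (show (6:Int) < 11 by norm_num)]
  simp only [show PySem.Int.floordiv ((6:Int) + 11) 2 = 8 from by decide,
    show (PySem.List.pyGet? SAC_boundaries 8).getD 0 = (200:Int) from by decide]
  rw [if_neg (show ¬((200:Int) ≤ k) by omega)]
  rw [SAC_bsearch, dif_pos (show (6:Int) < 8 by norm_num)]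
  simp only [show PySem.Int.floordiv ((6:Int) + 8) 2 = 7 from by decide,
    show (PySem.List.pyGet? SAC_boundaries 7).getD 0 = (100:Int) from by decide]
  rw [if_pos (show (100:Int) ≤ k by omega)]
  simp only [Int.reduceAdd]
  rw [SAC_bsearch, dif_neg (show ¬((8:Int) < 8) by norm_num)]

theorem SAC_bs9 (k : Int) (ha : 200 ≤ k) (hb : k < 500) : SAC_bsearch k 0 11 = 9 := by
  rw [SAC_bsearch, dif_pos (show (0:Int) < 11 by norm_num)]
  simp only [show PySem.Int.floordiv ((0:Int) + 11) 2 = 5 from by decide,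
    show (PySem.List.pyGet? SAC_boundaries 5).getD 0 = (25:Int) from by decide]
  rw [if_pos (show (25:Int) ≤ k by omega)]
  simp only [Int.reduceAdd]
  rw [SAC_bsearch, dif_pos (show (6:Int) < 11 by norm_num)]
  simp only [show PySem.Int.floordiv ((6:Int) + 11) 2 = 8 from by decide,
    show (PySem.List.pyGet? SAC_boundaries 8).getD 0 = (200:Int) from by decide]
  rw [if_pos (show (200:Int) ≤ k by omega)]
  simp only [Int.reduceAdd]
  rw [SAC_bsearch, dif_pos (show (9:Int) < 11 by norm_num)]
  simp only [show PySem.Int.floordiv ((9:Int) + 11) 2 = 10 from by decide,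
    show (PySem.List.pyGet? SAC_boundaries 10).getD 0 = (1000:Int) from by decide]
  rw [if_neg (show ¬((1000:Int) ≤ k) by omega)]
  rw [SAC_bsearch, dif_pos (show (9:Int) < 10 by norm_num)]
  simp only [show PySem.Int.floordiv ((9:Int) + 10) 2 = 9 from by decide,
    show (PySem.List.pyGet? SAC_boundaries 9).getD 0 = (500:Int) from by decide]
  rw [if_neg (show ¬((500:Int) ≤ k) by omega)]
  rw [SAC_bsearch, dif_neg (show ¬((9:Int) < 9) by norm_num)]

theorem SAC_bs10 (k : Int) (ha : 500 ≤ k) (hb : k < 1000) : SAC_bsearch k 0 11 = 10 := by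
  rw [SAC_bsearch, dif_pos (show (0:Int) < 11 by norm_num)]
  simp only [show PySem.Int.floordiv ((0:Int) + 11) 2 = 5 from by decide,
    show (PySem.List.pyGet? SAC_boundaries 5).getD 0 = (25:Int) from by decide]
  rw [if_pos (show (25:Int) ≤ k by omega)]
  simp only [Int.reduceAdd]
  rw [SAC_bsearch, dif_pos (show (6:Int) < 11 by norm_num)]
  simp only [show PySem.Int.floordiv ((6:Int) + 11) 2 = 8 from by decide,
    show (PySem.List.pyGet? SAC_boundaries 8).getD 0 = (200:Int) from by decide]
  rw [if_pos (show (200:Int) ≤ k by omega)]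
  simp only [Int.reduceAdd]
  rw [SAC_bsearch, dif_pos (show (9:Int) < 11 by norm_num)]
  simp only [show PySem.Int.floordiv ((9:Int) + 11) 2 = 10 from by decide,
    show (PySem.List.pyGet? SAC_boundaries 10).getD 0 = (1000:Int) from by decide]
  rw [if_neg (show ¬((1000:Int) ≤ k) by omega)]
  rw [SAC_bsearch, dif_pos (show (9:Int) < 10 by norm_num)]
  simp only [show PySem.Int.floordiv ((9:Int) + 10) 2 = 9 from by decide,
    show (PySem.List.pyGet? SAC_boundaries 9).getD 0 = (500:Int) from by decide]
  rw [if_pos (show (500:Int) ≤ k by omega)]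
  simp only [Int.reduceAdd]
  rw [SAC_bsearch, dif_neg (show ¬((10:Int) < 10) by norm_num)]

theorem SAC_bs11 (k : Int) (ha : 1000 ≤ k) : SAC_bsearch k 0 11 = 11 := by
  rw [SAC_bsearch, dif_pos (show (0:Int) < 11 by norm_num)]
  simp only [show PySem.Int.floordiv ((0:Int) + 11) 2 = 5 from by decide,
    show (PySem.List.pyGet? SAC_boundaries 5).getD 0 = (25:Int) from by decide]
  rw [if_pos (show (25:Int) ≤ k by omega)]
  simp only [Int.reduceAdd]
  rw [SAC_bsearch, dif_pos (show (6:Int) < 11 by norm_num)]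
  simp only [show PySem.Int.floordiv ((6:Int) + 11) 2 = 8 from by decide,
    show (PySem.List.pyGet? SAC_boundaries 8).getD 0 = (200:Int) from by decide]
  rw [if_pos (show (200:Int) ≤ k by omega)]
  simp only [Int.reduceAdd]
  rw [SAC_bsearch, dif_pos (show (9:Int) < 11 by norm_num)]
  simp only [show PySem.Int.floordiv ((9:Int) + 11) 2 = 10 from by decide,
    show (PySem.List.pyGet? SAC_boundaries 10).getD 0 = (1000:Int) from by decide]
  rw [if_pos (show (1000:Int) ≤ k by omega)]
  simp only [Int.reduceAdd]
  rw [SAC_bsearch, dif_neg (show ¬((11:Int) < 11) by norm_num)]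

theorem SAC_cons_eq (k v : Int) (rest : List (Int × Int)) :
    segment_answer_count ((k, v) :: rest) = segment_answer_count_alt ((k, v) :: rest) := by
  rw [segment_answer_count, segment_answer_count_alt,
    show PySem.List.enumerate SAC_boundaries
      = [(0, 0), (1, 1), (2, 2), (3, 5), (4, 10), (5, 25), (6, 50), (7, 100), (8, 200), (9, 500), (10, 1000)] from by decide]
  simp only [PySem.Dict.get?_mk_cons, beq_self_eq_true, if_true,
    show ((SAC_boundaries.length : Int)) = 11 from by decide]
  by_cases hn : k < 0
  · -- bucket 0
    rw [SAC_skip_pair _ k v 0 0 1 _ (by decide) (by decide) (by omega)]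
    rw [SAC_skip_pair _ k v 1 1 2 _ (by decide) (by decide) (by omega)]
    rw [SAC_skip_pair _ k v 2 2 5 _ (by decide) (by decide) (by omega)]
    rw [SAC_skip_pair _ k v 3 5 10 _ (by decide) (by decide) (by omega)]
    rw [SAC_skip_pair _ k v 4 10 25 _ (by decide) (by decide) (by omega)]
    rw [SAC_skip_pair _ k v 5 25 50 _ (by decide) (by decide) (by omega)]
    rw [SAC_skip_pair _ k v 6 50 100 _ (by decide) (by decide) (by omega)]
    rw [SAC_skip_pair _ k v 7 100 200 _ (by decide) (by decide) (by omega)]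
    rw [SAC_skip_pair _ k v 8 200 500 _ (by decide) (by decide) (by omega)]
    rw [SAC_skip_pair _ k v 9 500 1000 _ (by decide) (by decide) (by omega)]
    rw [SAC_skip_last _ k v 10 1000 _ (by decide) (by omega)]
    simp only [SAC_loopA, SAC_bs0 k hn, Int.reduceEq, reduceIte]
  by_cases h0 : k < 1
  · -- bucket 1
    rw [SAC_hit_pair _ k v 0 0 1 _ (by decide) (by decide) (by omega)]
    simp only [SAC_bs1 k (by omega) (by omega), Int.reduceEq, reduceIte, Int.reduceSub]
    rfl
  by_cases h1 : k < 2
  · -- bucket 2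
    rw [SAC_skip_pair _ k v 0 0 1 _ (by decide) (by decide) (by omega)]
    rw [SAC_hit_pair _ k v 1 1 2 _ (by decide) (by decide) (by omega)]
    simp only [SAC_bs2 k (by omega) (by omega), Int.reduceEq, reduceIte, Int.reduceSub]
    rfl
  by_cases h2 : k < 5
  · -- bucket 3
    rw [SAC_skip_pair _ k v 0 0 1 _ (by decide) (by decide) (by omega)]
    rw [SAC_skip_pair _ k v 1 1 2 _ (by decide) (by decide) (by omega)]
    rw [SAC_hit_pair _ k v 2 2 5 _ (by decide) (by decide) (by omega)]
    simp only [SAC_bs3 k (by omega) (by omega), Int.reduceEq, reduceIte, Int.reduceSub]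
    rfl
  by_cases h3 : k < 10
  · -- bucket 4
    rw [SAC_skip_pair _ k v 0 0 1 _ (by decide) (by decide) (by omega)]
    rw [SAC_skip_pair _ k v 1 1 2 _ (by decide) (by decide) (by omega)]
    rw [SAC_skip_pair _ k v 2 2 5 _ (by decide) (by decide) (by omega)]
    rw [SAC_hit_pair _ k v 3 5 10 _ (by decide) (by decide) (by omega)]
    simp only [SAC_bs4 k (by omega) (by omega), Int.reduceEq, reduceIte, Int.reduceSub]
    rfl
  by_cases h4 : k < 25
  · -- bucket 5
    rw [SAC_skip_pair _ k v 0 0 1 _ (by decide) (by decide) (by omega)]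
    rw [SAC_skip_pair _ k v 1 1 2 _ (by decide) (by decide) (by omega)]
    rw [SAC_skip_pair _ k v 2 2 5 _ (by decide) (by decide) (by omega)]
    rw [SAC_skip_pair _ k v 3 5 10 _ (by decide) (by decide) (by omega)]
    rw [SAC_hit_pair _ k v 4 10 25 _ (by decide) (by decide) (by omega)]
    simp only [SAC_bs5 k (by omega) (by omega), Int.reduceEq, reduceIte, Int.reduceSub]
    rfl
  by_cases h5 : k < 50
  · -- bucket 6
    rw [SAC_skip_pair _ k v 0 0 1 _ (by decide) (by decide) (by omega)]
    rw [SAC_skip_pair _ k v 1 1 2 _ (by decide) (by decide) (by omega)]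
    rw [SAC_skip_pair _ k v 2 2 5 _ (by decide) (by decide) (by omega)]
    rw [SAC_skip_pair _ k v 3 5 10 _ (by decide) (by decide) (by omega)]
    rw [SAC_skip_pair _ k v 4 10 25 _ (by decide) (by decide) (by omega)]
    rw [SAC_hit_pair _ k v 5 25 50 _ (by decide) (by decide) (by omega)]
    simp only [SAC_bs6 k (by omega) (by omega), Int.reduceEq, reduceIte, Int.reduceSub]
    rfl
  by_cases h6 : k < 100
  · -- bucket 7
    rw [SAC_skip_pair _ k v 0 0 1 _ (by decide) (by decide) (by omega)]
    rw [SAC_skip_pair _ k v 1 1 2 _ (by decide) (by decide) (by omega)]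
    rw [SAC_skip_pair _ k v 2 2 5 _ (by decide) (by decide) (by omega)]
    rw [SAC_skip_pair _ k v 3 5 10 _ (by decide) (by decide) (by omega)]
    rw [SAC_skip_pair _ k v 4 10 25 _ (by decide) (by decide) (by omega)]
    rw [SAC_skip_pair _ k v 5 25 50 _ (by decide) (by decide) (by omega)]
    rw [SAC_hit_pair _ k v 6 50 100 _ (by decide) (by decide) (by omega)]
    simp only [SAC_bs7 k (by omega) (by omega), Int.reduceEq, reduceIte, Int.reduceSub]
    rfl
  by_cases h7 : k < 200
  · -- bucket 8
    rw [SAC_skip_pair _ k v 0 0 1 _ (by decide) (by decide) (by omega)]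
    rw [SAC_skip_pair _ k v 1 1 2 _ (by decide) (by decide) (by omega)]
    rw [SAC_skip_pair _ k v 2 2 5 _ (by decide) (by decide) (by omega)]
    rw [SAC_skip_pair _ k v 3 5 10 _ (by decide) (by decide) (by omega)]
    rw [SAC_skip_pair _ k v 4 10 25 _ (by decide) (by decide) (by omega)]
    rw [SAC_skip_pair _ k v 5 25 50 _ (by decide) (by decide) (by omega)]
    rw [SAC_skip_pair _ k v 6 50 100 _ (by decide) (by decide) (by omega)]
    rw [SAC_hit_pair _ k v 7 100 200 _ (by decide) (by decide) (by omega)]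
    simp only [SAC_bs8 k (by omega) (by omega), Int.reduceEq, reduceIte, Int.reduceSub]
    rfl
  by_cases h8 : k < 500
  · -- bucket 9
    rw [SAC_skip_pair _ k v 0 0 1 _ (by decide) (by decide) (by omega)]
    rw [SAC_skip_pair _ k v 1 1 2 _ (by decide) (by decide) (by omega)]
    rw [SAC_skip_pair _ k v 2 2 5 _ (by decide) (by decide) (by omega)]
    rw [SAC_skip_pair _ k v 3 5 10 _ (by decide) (by decide) (by omega)]
    rw [SAC_skip_pair _ k v 4 10 25 _ (by decide) (by decide) (by omega)]
    rw [SAC_skip_pair _ k v 5 25 50 _ (by decide) (by decide) (by omega)]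
    rw [SAC_skip_pair _ k v 6 50 100 _ (by decide) (by decide) (by omega)]
    rw [SAC_skip_pair _ k v 7 100 200 _ (by decide) (by decide) (by omega)]
    rw [SAC_hit_pair _ k v 8 200 500 _ (by decide) (by decide) (by omega)]
    simp only [SAC_bs9 k (by omega) (by omega), Int.reduceEq, reduceIte, Int.reduceSub]
    rfl
  by_cases h9 : k < 1000
  · -- bucket 10
    rw [SAC_skip_pair _ k v 0 0 1 _ (by decide) (by decide) (by omega)]
    rw [SAC_skip_pair _ k v 1 1 2 _ (by decide) (by decide) (by omega)]
    rw [SAC_skip_pair _ k v 2 2 5 _ (by decide) (by decide) (by omega)]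
    rw [SAC_skip_pair _ k v 3 5 10 _ (by decide) (by decide) (by omega)]
    rw [SAC_skip_pair _ k v 4 10 25 _ (by decide) (by decide) (by omega)]
    rw [SAC_skip_pair _ k v 5 25 50 _ (by decide) (by decide) (by omega)]
    rw [SAC_skip_pair _ k v 6 50 100 _ (by decide) (by decide) (by omega)]
    rw [SAC_skip_pair _ k v 7 100 200 _ (by decide) (by decide) (by omega)]
    rw [SAC_skip_pair _ k v 8 200 500 _ (by decide) (by decide) (by omega)]
    rw [SAC_hit_pair _ k v 9 500 1000 _ (by decide) (by decide) (by omega)]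
    simp only [SAC_bs10 k (by omega) (by omega), Int.reduceEq, reduceIte, Int.reduceSub]
    rfl
  · -- bucket 11
    rw [SAC_skip_pair _ k v 0 0 1 _ (by decide) (by decide) (by omega)]
    rw [SAC_skip_pair _ k v 1 1 2 _ (by decide) (by decide) (by omega)]
    rw [SAC_skip_pair _ k v 2 2 5 _ (by decide) (by decide) (by omega)]
    rw [SAC_skip_pair _ k v 3 5 10 _ (by decide) (by decide) (by omega)]
    rw [SAC_skip_pair _ k v 4 10 25 _ (by decide) (by decide) (by omega)]
    rw [SAC_skip_pair _ k v 5 25 50 _ (by decide) (by decide) (by omega)]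
    rw [SAC_skip_pair _ k v 6 50 100 _ (by decide) (by decide) (by omega)]
    rw [SAC_skip_pair _ k v 7 100 200 _ (by decide) (by decide) (by omega)]
    rw [SAC_skip_pair _ k v 8 200 500 _ (by decide) (by decide) (by omega)]
    rw [SAC_skip_pair _ k v 9 500 1000 _ (by decide) (by decide) (by omega)]
    rw [SAC_hit_last _ k v 10 1000 _ (by decide) (by omega)]
    simp only [SAC_bs11 k (by omega), Int.reduceEq, reduceIte, Int.reduceSub]
    rfl

-- ===== VERDICT (by name: the statement is the Claim_ definition above) =====
theorem segment_answer_count_spec : Claim_equal_segment_answer_count := by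
  intro data _ hpre
  match data with
  | [] => exact absurd rfl hpre.1
  | (k, v) :: rest => exact SAC_cons_eq k v rest
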